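-- pv_equiv track=rewrite | github.com/jmetzz/sandbox-python | src/leetcode/p_498_diagonal_traverse.py | find_diagonal_natural_order
-- ===== SOURCE A (Python) =====
-- def find_diagonal_natural_order(grid: list[list[int]]) -> list[int]:
--     if not grid or not grid[0]:
--         return []
--     n, m = len(grid), len(grid[0])
--
--     answer = []
--     for diagonal in range(m + n - 1):
--         # identify the head of the diagonal
--         if diagonal < m:
--             row = 0
--             col = diagonal
--         else:
--             row = diagonal - m + 1
--             col = m - 1
--
--         # Iterate until one of the indices goes out of bounds
--         # Take note of the index math to go down the diagonal
--         while row < n and col > -1: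
--             answer.append(grid[row][col])
--             row += 1
--             col -= 1
--     return answer
-- ===== SOURCE B (Python) =====
-- def find_diagonal_natural_order(grid: list[list[int]]) -> list[int]:
--     if not grid:
--         return []
--     n, m = len(grid), len(grid[0])
--     buckets = [[] for _ in range(m + n - 1)]
--     for i in range(n):
--         for j in range(m):
--             buckets[i + j].append(grid[i][j])
--     out = []
--     for b in buckets:
--         out += b
--     return out
-- ===== Notes on version B (the rewrite author's own statement) =====
-- stated objective: simpler
-- what changed: Replaces the per-diagonal head computation and inner while-walk by a single row-major pass that scatters each cell into a bucket keyed by i+j, then concatenates the buckets.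
import Mathlib
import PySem

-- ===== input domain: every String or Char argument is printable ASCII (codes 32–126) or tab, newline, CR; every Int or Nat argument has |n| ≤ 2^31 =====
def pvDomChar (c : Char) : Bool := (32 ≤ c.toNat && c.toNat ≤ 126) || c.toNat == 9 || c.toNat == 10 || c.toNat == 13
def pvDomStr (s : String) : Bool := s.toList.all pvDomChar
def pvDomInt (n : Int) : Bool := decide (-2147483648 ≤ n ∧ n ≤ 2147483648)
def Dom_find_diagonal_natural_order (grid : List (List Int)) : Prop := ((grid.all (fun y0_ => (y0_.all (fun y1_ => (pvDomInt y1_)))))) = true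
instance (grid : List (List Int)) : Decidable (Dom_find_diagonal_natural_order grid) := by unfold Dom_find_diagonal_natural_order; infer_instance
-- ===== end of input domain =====

-- B replaces A's per-diagonal head computation and inner while-walk by a single row-major
-- pass scattering each cell into a bucket keyed by i+j, then concatenating the buckets.


-- ===== PORT A =====
-- the inner 'while row < n and col > -1' loop of A (answer.append(grid[row][col]); row += 1; col -= 1)
def pvWalkA (grid : List (List Int)) (n : Int) (row col : Int) (acc : List Int) : List Int :=
  if _h : row < n ∧ -1 < col then
    pvWalkA grid n (row + 1) (col - 1)
      (acc ++ [PySem.List.pyGetD (PySem.List.pyGetD grid row []) col 0])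
  else acc
termination_by (n - row).toNat
decreasing_by omega

def find_diagonal_natural_order (grid : List (List Int)) : List Int :=
  if grid = [] ∨ PySem.List.pyGetD grid 0 [] = [] then []
  else
    let n : Int := grid.length
    let m : Int := (PySem.List.pyGetD grid 0 []).length
    (PySem.List.pyRange 0 (m + n - 1) 1).foldl
      (fun answer diagonal =>
        let row : Int := if diagonal < m then 0 else diagonal - m + 1
        let col : Int := if diagonal < m then diagonal else m - 1
        pvWalkA grid n row col answer) []

-- ===== PORT B =====
def find_diagonal_natural_order_alt (grid : List (List Int)) : List Int :=
  if grid = [] then []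
  else
    let n : Int := grid.length
    let m : Int := (PySem.List.pyGetD grid 0 []).length
    let buckets0 : List (List Int) := (PySem.List.pyRange 0 (m + n - 1) 1).map (fun _ => ([] : List Int))
    let buckets :=
      (PySem.List.pyRange 0 n 1).foldl (fun bs i =>
        (PySem.List.pyRange 0 m 1).foldl (fun bs j =>
          PySem.List.pySetD bs (i + j)
            (PySem.List.pyGetD bs (i + j) [] ++
              [PySem.List.pyGetD (PySem.List.pyGetD grid i []) j 0])) bs) buckets0
    buckets.foldl (fun out b => out ++ b) []

-- ===== PRECONDITION & SPEC =====
-- Pre_ excludes exactly the inputs where Python A raises IndexError: some row shorter than the first row.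
def Pre_find_diagonal_natural_order (grid : List (List Int)) : Prop :=
  ∀ r ∈ grid, (grid.headD []).length ≤ r.length
instance (grid : List (List Int)) : Decidable (Pre_find_diagonal_natural_order grid) := by
  unfold Pre_find_diagonal_natural_order; infer_instance
def pvWitness_find_diagonal_natural_order : List (List Int) := [[1, 2], [3, 4], [5, 6]]
def Spec_find_diagonal_natural_order (grid : List (List Int)) (out : List Int) : Prop := out = find_diagonal_natural_order_alt grid
instance (grid : List (List Int)) (out : List Int) : Decidable (Spec_find_diagonal_natural_order grid out) := by unfold Spec_find_diagonal_natural_order; infer_instance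

-- ===== CLAIM (what is proved, stated in full; the proofs are below) =====
def Claim_equal_find_diagonal_natural_order : Prop := ∀ (grid : List (List Int)), Dom_find_diagonal_natural_order grid → Pre_find_diagonal_natural_order grid → Spec_find_diagonal_natural_order grid (find_diagonal_natural_order grid)

-- ===== LEMMAS AND PROOFS =====

-- cell access, Nat-indexed
def pvG (grid : List (List Int)) (i j : Nat) : Int := (grid.getD i []).getD j 0

-- the canonical per-diagonal list both ports are proved to produce
def pvDg (grid : List (List Int)) (n' m' k : Nat) : List Int :=
  (List.range' (k + 1 - m') (min n' (k + 1) - (k + 1 - m'))).map (fun i => pvG grid i (k - i))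

theorem pvWalkA_eq (grid : List (List Int)) (n' s : Nat) :
    ∀ (row : Nat) (acc : List Int), row ≤ s + 1 →
      pvWalkA grid (n' : Int) (row : Int) ((s : Int) - (row : Int)) acc =
        acc ++ (List.range' row (min n' (s + 1) - row)).map (fun i => pvG grid i (s - i)) := by
  have key : ∀ (fuel row : Nat) (acc : List Int), n' - row ≤ fuel → row ≤ s + 1 →
      pvWalkA grid (n' : Int) (row : Int) ((s : Int) - (row : Int)) acc =
        acc ++ (List.range' row (min n' (s + 1) - row)).map (fun i => pvG grid i (s - i)) := by
    intro fuel
    induction fuel with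
    | zero =>
      intro row acc hf hr
      rw [pvWalkA]
      have hc : ¬ ((row : Int) < (n' : Int) ∧ -1 < (s : Int) - (row : Int)) := by
        omega
      rw [dif_neg hc]
      have h0 : min n' (s + 1) - row = 0 := by omega
      simp [h0]
    | succ f ih =>
      intro row acc hf hr
      rw [pvWalkA]
      by_cases hc : (row : Int) < (n' : Int) ∧ -1 < (s : Int) - (row : Int)
      · have hrn : row < n' := by exact_mod_cast hc.1
        have hrs : row ≤ s := by
          have := hc.2; omega
        rw [dif_pos hc]
        have e1 : (s : Int) - (row : Int) - 1 = (s : Int) - ((row + 1 : Nat) : Int) := by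
          omega
        have e2 : ((row : Int) + 1) = ((row + 1 : Nat) : Int) := by omega
        rw [e1, e2, ih (row + 1) _ (by omega) (by omega)]
        have hv : PySem.List.pyGetD (PySem.List.pyGetD grid (row : Int) []) ((s : Int) - (row : Int)) 0
            = pvG grid row (s - row) := by
          have e3 : (s : Int) - (row : Int) = ((s - row : Nat) : Int) := by omega
          rw [e3, PySem.List.pyGetD_natCast, PySem.List.pyGetD_natCast, pvG]
        have hlen : min n' (s + 1) - row = (min n' (s + 1) - (row + 1)) + 1 := by omega
        rw [hv, hlen, List.range'_succ]
        simp
      · rw [dif_neg hc]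
        push_cast at hc
        have h0 : min n' (s + 1) - row = 0 := by omega
        simp [h0]
  intro row acc hr
  exact key n' row acc (by omega) hr

theorem portA_eq (grid : List (List Int)) (hg : grid ≠ []) (hh : grid.headD [] ≠ []) :
    find_diagonal_natural_order grid =
      (List.range ((grid.headD []).length + grid.length - 1)).flatMap
        (pvDg grid grid.length (grid.headD []).length) := by
  set n' := grid.length with hn
  set m' := (grid.headD []).length with hm
  have hn1 : 1 ≤ n' := by rw [hn]; exact List.length_pos_iff.mpr hg
  have hm1 : 1 ≤ m' := by rw [hm]; exact List.length_pos_iff.mpr hh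
  have h0 : PySem.List.pyGetD grid 0 [] = grid.headD [] := by
    cases grid <;> simp [PySem.List.pyGetD_zero]
  have hcast : (m' : Int) + (n' : Int) - 1 = ((m' + n' - 1 : Nat) : Int) := by omega
  unfold find_diagonal_natural_order
  rw [if_neg (by simp only [not_or]; exact ⟨hg, by rw [h0]; exact hh⟩)]
  simp only [h0, ← hn, ← hm]
  rw [hcast, PySem.List.pyRange_zero_nat, List.foldl_map]
  rw [PySem.List.foldl_congr_mem _ _ (fun acc s => acc ++ pvDg grid n' m' s) _ ?_]
  · exact PySem.List.foldl_append_eq_flatMap _ _ _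
  · intro acc s _
    have hr0 : (if (s : Int) < (m' : Int) then (0 : Int) else (s : Int) - (m' : Int) + 1)
        = ((s + 1 - m' : Nat) : Int) := by split <;> omega
    have hc0 : (if (s : Int) < (m' : Int) then (s : Int) else (m' : Int) - 1)
        = (s : Int) - ((s + 1 - m' : Nat) : Int) := by split <;> omega
    simp only [hr0, hc0]
    rw [pvWalkA_eq grid n' s (s + 1 - m') acc (by omega)]
    rfl

-- the Nat-indexed scatter step of B: buckets[i+j].append(grid[i][j])
def pvStep (grid : List (List Int)) (i : Nat) (bs : List (List Int)) (j : Nat) : List (List Int) :=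
  bs.set (i + j) (bs.getD (i + j) [] ++ [pvG grid i j])

theorem pvInner_len (grid : List (List Int)) (i : Nat) :
    ∀ (js : List Nat) (bs : List (List Int)), (js.foldl (pvStep grid i) bs).length = bs.length := by
  intro js
  induction js with
  | nil => intro bs; rfl
  | cons j t ih => intro bs; rw [List.foldl_cons, ih]; simp [pvStep]

theorem pvInner_getD (grid : List (List Int)) (i m' : Nat) :
    ∀ (bs : List (List Int)) (k : Nat), k < bs.length →
      ((List.range m').foldl (pvStep grid i) bs).getD k []
        = bs.getD k [] ++ (if i ≤ k ∧ k < i + m' then [pvG grid i (k - i)] else []) := by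
  induction m' with
  | zero => intro bs k hk; simp
  | succ m ih =>
    intro bs k hk
    rw [List.range_succ, List.foldl_append, List.foldl_cons, List.foldl_nil]
    have hlenF : ((List.range m).foldl (pvStep grid i) bs).length = bs.length :=
      pvInner_len grid i _ bs
    by_cases hke : k = i + m
    · subst hke
      rw [pvStep, List.getD_eq_getElem?_getD, List.getElem?_set]
      rw [if_pos rfl, if_pos (by omega)]
      simp only [Option.getD_some]
      rw [ih bs _ hk, if_neg (by omega), if_pos (by omega)]
      simp
    · rw [pvStep, List.getD_eq_getElem?_getD, List.getElem?_set, if_neg (by omega)]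
      rw [← List.getD_eq_getElem?_getD, ih bs _ hk]
      by_cases hc : i ≤ k ∧ k < i + m
      · rw [if_pos hc, if_pos (by omega)]
      · rw [if_neg hc, if_neg (by omega)]

theorem pvOuterFold_len (grid : List (List Int)) (m' : Nat) :
    ∀ (is : List Nat) (bs : List (List Int)),
      (is.foldl (fun bs i => (List.range m').foldl (pvStep grid i) bs) bs).length = bs.length := by
  intro is
  induction is with
  | nil => intro bs; rfl
  | cons i t ih => intro bs; rw [List.foldl_cons, ih, pvInner_len]

theorem pvOuter_getD (grid : List (List Int)) (m' : Nat) :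
    ∀ (n'' : Nat) (bs : List (List Int)) (k : Nat), k < bs.length →
      ((List.range n'').foldl (fun bs i => (List.range m').foldl (pvStep grid i) bs) bs).getD k []
        = bs.getD k [] ++
            (List.range n'').flatMap (fun i => if i ≤ k ∧ k < i + m' then [pvG grid i (k - i)] else []) := by
  intro n''
  induction n'' with
  | zero => intro bs k hk; simp
  | succ n ih =>
    intro bs k hk
    rw [List.range_succ, List.foldl_append, List.foldl_cons, List.foldl_nil]
    have hlenF : ((List.range n).foldl (fun bs i => (List.range m').foldl (pvStep grid i) bs) bs).length
        = bs.length := pvOuterFold_len grid m' _ bs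
    rw [pvInner_getD grid n m' _ k (by omega), ih bs k hk, List.flatMap_append]
    simp

theorem pvFlatten_eq (bs : List (List Int)) :
    bs.flatten = (List.range bs.length).flatMap (fun k => bs.getD k []) := by
  induction bs with
  | nil => simp
  | cons b t ih =>
    rw [List.flatten_cons, List.length_cons, List.range_succ_eq_map]
    rw [List.flatMap_cons, List.flatMap_map]
    simp only [List.getD_cons_zero, Nat.succ_eq_add_one]
    rw [ih]
    congr 1

theorem pvFlat (v : Nat → Int) (m' : Nat) (hm : 1 ≤ m') (k : Nat) :
    ∀ n', (List.range n').flatMap (fun i => if i ≤ k ∧ k < i + m' then [v i] else [])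
      = (List.range' (k + 1 - m') (min n' (k + 1) - (k + 1 - m'))).map v := by
  intro n'
  induction n' with
  | zero => simp
  | succ n ih =>
    rw [List.range_succ, List.flatMap_append, ih]
    by_cases hc : n ≤ k ∧ k < n + m'
    · have hlen : min (n + 1) (k + 1) - (k + 1 - m') = (min n (k + 1) - (k + 1 - m')) + 1 := by omega
      rw [hlen, List.range'_1_concat]
      have he : k + 1 - m' + (min n (k + 1) - (k + 1 - m')) = n := by omega
      rw [he]
      simp [hc]
    · have hlen : min (n + 1) (k + 1) - (k + 1 - m') = min n (k + 1) - (k + 1 - m') := by omega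
      rw [hlen]
      simp [hc]

theorem pvGetD_map_const {α : Type} (l : List α) (k : Nat) :
    (l.map (fun _ => ([] : List Int))).getD k [] = [] := by
  rw [List.getD_eq_getElem?_getD, List.getElem?_map]
  cases l[k]? <;> simp

theorem portB_eq (grid : List (List Int)) (hg : grid ≠ []) (hh : grid.headD [] ≠ []) :
    find_diagonal_natural_order_alt grid =
      (List.range ((grid.headD []).length + grid.length - 1)).flatMap
        (pvDg grid grid.length (grid.headD []).length) := by
  set n' := grid.length with hn
  set m' := (grid.headD []).length with hm
  have hn1 : 1 ≤ n' := by rw [hn]; exact List.length_pos_iff.mpr hg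
  have hm1 : 1 ≤ m' := by rw [hm]; exact List.length_pos_iff.mpr hh
  have h0 : PySem.List.pyGetD grid 0 [] = grid.headD [] := by
    cases grid <;> simp [PySem.List.pyGetD_zero]
  have hcast : (m' : Int) + (n' : Int) - 1 = ((m' + n' - 1 : Nat) : Int) := by omega
  unfold find_diagonal_natural_order_alt
  rw [if_neg hg]
  simp only [h0, ← hn, ← hm]
  rw [PySem.List.foldl_append_eq_flatten, List.nil_append]
  rw [hcast]
  simp only [PySem.List.pyRange_zero_nat]
  rw [List.foldl_map]
  rw [PySem.List.foldl_congr_mem _ _ (fun bs i => (List.range m').foldl (pvStep grid i) bs) _ ?_]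
  · rw [pvFlatten_eq]
    rw [pvOuterFold_len grid m']
    simp only [List.length_map, List.length_range]
    rw [List.flatMap_def, List.flatMap_def]
    apply congrArg List.flatten
    apply List.map_eq_map_iff.mpr
    intro k hk
    have hknb : k < m' + n' - 1 := List.mem_range.mp hk
    rw [pvOuter_getD grid m' n' _ k (by simp; omega)]
    rw [pvGetD_map_const, List.nil_append, pvFlat _ m' hm1 k n']
    rfl
  · intro bs i hi
    rw [List.foldl_map]
    apply PySem.List.foldl_congr_mem
    intro bs' j hj
    have e : ((i : Int) + (j : Int)) = ((i + j : Nat) : Int) := by push_cast; ring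
    rw [e, PySem.List.pySetD_natCast, PySem.List.pyGetD_natCast, PySem.List.pyGetD_natCast,
      PySem.List.pyGetD_natCast]
    rfl

theorem portB_empty_row (grid : List (List Int)) (hh : grid.headD [] = []) :
    find_diagonal_natural_order_alt grid = [] := by
  by_cases hg : grid = []
  · subst hg; rfl
  · have h0 : PySem.List.pyGetD grid 0 [] = grid.headD [] := by
      cases grid <;> simp [PySem.List.pyGetD_zero]
    unfold find_diagonal_natural_order_alt
    rw [if_neg hg]
    simp only [h0, hh, List.length_nil, Nat.cast_zero]
    have hr0 : PySem.List.pyRange 0 0 = ([] : List Int) := by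
      rw [PySem.List.pyRange_zero]; simp
    rw [hr0]
    simp only [List.foldl_nil]
    rw [List.foldl_fixed]
    rw [PySem.List.foldl_append_eq_flatten, List.nil_append, List.flatten_eq_nil_iff]
    simp

-- ===== VERDICT (by name: the statement is the Claim_ definition above) =====
theorem find_diagonal_natural_order_spec : Claim_equal_find_diagonal_natural_order := by
  intro grid _ _
  unfold Spec_find_diagonal_natural_order
  by_cases hg : grid = []
  · subst hg; rfl
  · by_cases hh : grid.headD [] = []
    · rw [portB_empty_row grid hh]
      have h0 : grid[0]?.getD [] = grid.headD [] := by cases grid <;> simp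
      unfold find_diagonal_natural_order
      have hh' : grid.head?.getD [] = [] := by cases grid <;> simp_all
      simp [hg, PySem.List.pyGetD_zero, h0, hh']
    · rw [portA_eq grid hg hh, portB_eq grid hg hh]
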